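-- pv_equiv track=rewrite | github.com/Hadzich/data_test | task_1_v2.py | match_multi
-- ===== SOURCE A (Python) =====
-- from typing import List, Dict, DefaultDict, Iterable
--
-- def match_multi(tokens: List[str], kw_tokens: List[str]) -> bool:
--     L = len(kw_tokens)
--     if L == 2:
--         a, b = kw_tokens
--         for i in range(len(tokens) - 1):
--             if tokens[i] == a and tokens[i+1] == b:
--                 return True
--             if tokens[i] == b and tokens[i+1] == a:
--                 return True
--         for i in range(len(tokens) - 2):
--             if tokens[i] == a and tokens[i+2] == b:
--                 return True
--             if tokens[i] == b and tokens[i+2] == a: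
--                 return True
--         return False
--     else:
--         seq = " ".join(kw_tokens)
--         joined = " ".join(tokens)
--         return seq in joined
-- ===== SOURCE B (Python) =====
-- def match_multi(tokens, kw_tokens):
--     if len(kw_tokens) == 2:
--         a, b = kw_tokens
--         last_a = None
--         last_b = None
--         for i, t in enumerate(tokens):
--             if t == b and last_a is not None and i - last_a <= 2:
--                 return True
--             if t == a and last_b is not None and i - last_b <= 2:
--                 return True
--             if t == a:
--                 last_a = i
--             if t == b:
--                 last_b = i
--         return False
--     seq = " ".join(kw_tokens)
--     joined = " ".join(tokens)
--     return seq in joined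
-- ===== Notes on version B (the rewrite author's own statement) =====
-- stated objective: alternative
-- what changed: For the two-keyword case B makes a single streaming pass maintaining two last-seen-index registers (last occurrence of each keyword) and fires when the current token's partner was last seen at most 2 positions back; A instead runs two staged offset-window scans (offsets +1 and +2, each checking both orders). The substring branch is unchanged.
import Mathlib
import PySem

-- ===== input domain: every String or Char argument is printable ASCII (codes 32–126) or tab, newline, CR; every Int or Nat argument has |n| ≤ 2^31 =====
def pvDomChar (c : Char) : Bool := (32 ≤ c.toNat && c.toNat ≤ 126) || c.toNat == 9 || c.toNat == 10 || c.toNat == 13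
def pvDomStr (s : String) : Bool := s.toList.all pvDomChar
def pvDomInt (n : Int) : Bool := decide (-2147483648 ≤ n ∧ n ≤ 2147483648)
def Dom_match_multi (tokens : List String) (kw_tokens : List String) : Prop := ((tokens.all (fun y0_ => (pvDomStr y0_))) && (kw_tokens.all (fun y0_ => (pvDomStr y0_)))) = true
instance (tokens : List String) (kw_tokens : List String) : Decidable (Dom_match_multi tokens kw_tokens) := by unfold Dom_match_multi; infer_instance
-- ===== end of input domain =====

-- B replaces A's two staged offset-window scans (offsets +1 and +2, both orders each) by a
-- single streaming pass keeping the last-seen index of each keyword and firing when the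
-- partner keyword was seen at most 2 positions back; the substring branch is unchanged
-- (objective: alternative).


-- ===== PORT A =====
-- Literal port: two scans over range(len-1) / range(len-2); the early 'return True' of the
-- Python loops is the Bool 'any', the sequential loops are '||'. Indices are in range, so
-- pyGetD is exact for tokens[i].
def match_multi (tokens : List String) (kw_tokens : List String) : Bool :=
  if kw_tokens.length = 2 then
    match kw_tokens with
    | a :: b :: _ =>
      ((PySem.List.pyRange 0 ((tokens.length : Int) - 1) 1).any (fun i =>
          (PySem.List.pyGetD tokens i "" == a && PySem.List.pyGetD tokens (i+1) "" == b)
          || (PySem.List.pyGetD tokens i "" == b && PySem.List.pyGetD tokens (i+1) "" == a)))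
      || ((PySem.List.pyRange 0 ((tokens.length : Int) - 2) 1).any (fun i =>
          (PySem.List.pyGetD tokens i "" == a && PySem.List.pyGetD tokens (i+2) "" == b)
          || (PySem.List.pyGetD tokens i "" == b && PySem.List.pyGetD tokens (i+2) "" == a)))
    | _ => false
  else
    PySem.Str.isIn (PySem.Str.join " " kw_tokens) (PySem.Str.join " " tokens)

-- ===== PORT B =====
-- 'last is not None and i - last <= 2' (None → Option Int).
def mmChk (last : Option Int) (i : Int) : Bool :=
  match last with
  | some j => decide (i - j ≤ 2)
  | none => false

-- The for-loop of Source B with its early returns and the two 'last seen' registers becomes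
-- structural recursion over the enumerated token list; branch order exactly as in Source B.
def mmLoop (a b : String) : List (Int × String) → Option Int → Option Int → Bool
  | [], _, _ => false
  | (i, t) :: rest, last_a, last_b =>
    if t == b && mmChk last_a i then true
    else if t == a && mmChk last_b i then true
    else mmLoop a b rest (if t == a then some i else last_a) (if t == b then some i else last_b)

-- 'a, b = kw_tokens' is rendered as head/second extraction (the branch runs only when length = 2).
def match_multi_alt (tokens : List String) (kw_tokens : List String) : Bool :=
  if kw_tokens.length = 2 then
    let a := kw_tokens.headD ""
    let b := kw_tokens.tail.headD ""
    mmLoop a b (PySem.List.enumerate tokens 0) none none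
  else
    PySem.Str.isIn (PySem.Str.join " " kw_tokens) (PySem.Str.join " " tokens)

-- ===== PRECONDITION & SPEC =====
def Spec_match_multi (tokens : List String) (kw_tokens : List String) (out : Bool) : Prop := out = match_multi_alt tokens kw_tokens
instance (tokens : List String) (kw_tokens : List String) (out : Bool) : Decidable (Spec_match_multi tokens kw_tokens out) := by unfold Spec_match_multi; infer_instance

-- ===== CLAIM (what is proved, stated in full; the proofs are below) =====
def Claim_equal_match_multi : Prop := ∀ (tokens : List String) (kw_tokens : List String), Dom_match_multi tokens kw_tokens → Spec_match_multi tokens kw_tokens (match_multi tokens kw_tokens)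

-- ===== LEMMAS AND PROOFS =====
-- Common characterisation: an occurrence of a and an occurrence of b at distance 1 or 2.
def Near (tokens : List String) (a b : String) : Prop :=
  ∃ k m : Nat, k < tokens.length ∧ m < tokens.length ∧
    tokens.getD k "" = a ∧ tokens.getD m "" = b ∧
    ((m : Int) - k = 1 ∨ (m : Int) - k = -1 ∨ (m : Int) - k = 2 ∨ (m : Int) - k = -2)

theorem mmChk_iff (o : Option Int) (i : Int) : mmChk o i = true ↔ ∃ j, o = some j ∧ i - j ≤ 2 := by
  cases o <;> simp [mmChk]

theorem A_iff_near (tokens : List String) (a b : String) :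
    match_multi tokens [a, b] = true ↔ Near tokens a b := by
  have hA : match_multi tokens [a, b] =
      (((PySem.List.pyRange 0 ((tokens.length : Int) - 1) 1).any (fun i =>
          (PySem.List.pyGetD tokens i "" == a && PySem.List.pyGetD tokens (i+1) "" == b)
          || (PySem.List.pyGetD tokens i "" == b && PySem.List.pyGetD tokens (i+1) "" == a)))
      || ((PySem.List.pyRange 0 ((tokens.length : Int) - 2) 1).any (fun i =>
          (PySem.List.pyGetD tokens i "" == a && PySem.List.pyGetD tokens (i+2) "" == b)
          || (PySem.List.pyGetD tokens i "" == b && PySem.List.pyGetD tokens (i+2) "" == a)))) := rfl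
  rw [hA, Bool.or_eq_true, List.any_eq_true, List.any_eq_true]
  simp only [PySem.List.mem_pyRange_one, Bool.or_eq_true, Bool.and_eq_true, beq_iff_eq]
  constructor
  · rintro (⟨i, ⟨h0, h1⟩, hc⟩ | ⟨i, ⟨h0, h1⟩, hc⟩)
    · have hi : i = ((i.toNat : Nat) : Int) := by omega
      have hi1 : ((i.toNat : Nat) : Int) + 1 = (((i.toNat + 1 : Nat)) : Int) := by push_cast; ring
      rw [hi, PySem.List.pyGetD_natCast, hi1, PySem.List.pyGetD_natCast] at hc
      rcases hc with ⟨ha, hb⟩ | ⟨hb, ha⟩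
      · exact ⟨i.toNat, i.toNat + 1, by omega, by omega, ha, hb, by omega⟩
      · exact ⟨i.toNat + 1, i.toNat, by omega, by omega, ha, hb, by omega⟩
    · have hi : i = ((i.toNat : Nat) : Int) := by omega
      have hi1 : ((i.toNat : Nat) : Int) + 2 = (((i.toNat + 2 : Nat)) : Int) := by push_cast; ring
      rw [hi, PySem.List.pyGetD_natCast, hi1, PySem.List.pyGetD_natCast] at hc
      rcases hc with ⟨ha, hb⟩ | ⟨hb, ha⟩
      · exact ⟨i.toNat, i.toNat + 2, by omega, by omega, ha, hb, by omega⟩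
      · exact ⟨i.toNat + 2, i.toNat, by omega, by omega, ha, hb, by omega⟩
  · rintro ⟨k, m, hk, hm, ha, hb, hd | hd | hd | hd⟩
    · refine Or.inl ⟨(k : Int), ⟨by omega, by omega⟩, Or.inl ⟨?_, ?_⟩⟩
      · rw [PySem.List.pyGetD_natCast]; exact ha
      · have h : (k : Int) + 1 = ((m : Nat) : Int) := by omega
        rw [h, PySem.List.pyGetD_natCast]; exact hb
    · refine Or.inl ⟨(m : Int), ⟨by omega, by omega⟩, Or.inr ⟨?_, ?_⟩⟩
      · rw [PySem.List.pyGetD_natCast]; exact hb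
      · have h : (m : Int) + 1 = ((k : Nat) : Int) := by omega
        rw [h, PySem.List.pyGetD_natCast]; exact ha
    · refine Or.inr ⟨(k : Int), ⟨by omega, by omega⟩, Or.inl ⟨?_, ?_⟩⟩
      · rw [PySem.List.pyGetD_natCast]; exact ha
      · have h : (k : Int) + 2 = ((m : Nat) : Int) := by omega
        rw [h, PySem.List.pyGetD_natCast]; exact hb
    · refine Or.inr ⟨(m : Int), ⟨by omega, by omega⟩, Or.inr ⟨?_, ?_⟩⟩
      · rw [PySem.List.pyGetD_natCast]; exact hb
      · have h : (m : Int) + 2 = ((k : Nat) : Int) := by omega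
        rw [h, PySem.List.pyGetD_natCast]; exact ha

-- Invariant of the streaming loop: provided both registers point strictly before the current
-- offset n, the loop succeeds iff some position m holds one keyword while the other keyword
-- occurs at distance ≤ 2 before it — either in the corresponding register or earlier in the list.
theorem mmLoop_iff (a b : String) :
    ∀ (ts : List String) (n : Int) (la lb : Option Int),
    (∀ j, la = some j → j < n) → (∀ j, lb = some j → j < n) →
    (mmLoop a b (PySem.List.enumerate ts n) la lb = true ↔
      ∃ m : Nat, m < ts.length ∧
        ((ts.getD m "" = b ∧ ((∃ j, la = some j ∧ n + m - j ≤ 2) ∨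
            ∃ k : Nat, k < m ∧ ts.getD k "" = a ∧ m - k ≤ 2))
         ∨ (ts.getD m "" = a ∧ ((∃ j, lb = some j ∧ n + m - j ≤ 2) ∨
            ∃ k : Nat, k < m ∧ ts.getD k "" = b ∧ m - k ≤ 2)))) := by
  intro ts
  induction ts with
  | nil =>
    intro n la lb _ _
    simp [PySem.List.enumerate_nil, mmLoop]
  | cons t rest ih =>
    intro n la lb hla hlb
    rw [PySem.List.enumerate_cons]
    simp only [mmLoop]
    by_cases h1 : (t == b && mmChk la n) = true
    · rw [if_pos h1]
      rw [Bool.and_eq_true, beq_iff_eq, mmChk_iff] at h1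
      obtain ⟨htb, j, hj, hd⟩ := h1
      simp only [true_iff]
      exact ⟨0, by simp, Or.inl ⟨by simpa using htb, Or.inl ⟨j, hj, by push_cast; omega⟩⟩⟩
    · rw [if_neg h1]
      by_cases h2 : (t == a && mmChk lb n) = true
      · rw [if_pos h2]
        rw [Bool.and_eq_true, beq_iff_eq, mmChk_iff] at h2
        obtain ⟨hta, j, hj, hd⟩ := h2
        simp only [true_iff]
        exact ⟨0, by simp, Or.inr ⟨by simpa using hta, Or.inl ⟨j, hj, by push_cast; omega⟩⟩⟩
      · rw [if_neg h2]
        rw [Bool.and_eq_true, beq_iff_eq, mmChk_iff] at h1 h2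
        push Not at h1 h2
        have hla' : ∀ j, (if t == a then some n else la) = some j → j < n + 1 := by
          intro j hj
          by_cases h : (t == a) = true
          · rw [if_pos h] at hj; have := Option.some.inj hj; omega
          · rw [if_neg h] at hj; have := hla j hj; omega
        have hlb' : ∀ j, (if t == b then some n else lb) = some j → j < n + 1 := by
          intro j hj
          by_cases h : (t == b) = true
          · rw [if_pos h] at hj; have := Option.some.inj hj; omega
          · rw [if_neg h] at hj; have := hlb j hj; omega
        rw [ih (n+1) _ _ hla' hlb']
        constructor
        · rintro ⟨m', hm', hcase⟩
          refine ⟨m' + 1, by simpa using Nat.succ_lt_succ hm', ?_⟩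
          rcases hcase with ⟨hb', hbr⟩ | ⟨ha', hbr⟩
          · refine Or.inl ⟨by simpa using hb', ?_⟩
            rcases hbr with ⟨j, hj, hd⟩ | ⟨k', hk', hka, hdk⟩
            · by_cases hta : (t == a) = true
              · rw [if_pos hta] at hj
                have hjn := Option.some.inj hj
                refine Or.inr ⟨0, by omega, by simpa using (beq_iff_eq.mp hta), by push_cast at hd ⊢; omega⟩
              · rw [if_neg hta] at hj
                exact Or.inl ⟨j, hj, by push_cast at hd ⊢; omega⟩
            · exact Or.inr ⟨k' + 1, by omega, by simpa using hka, by omega⟩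
          · refine Or.inr ⟨by simpa using ha', ?_⟩
            rcases hbr with ⟨j, hj, hd⟩ | ⟨k', hk', hka, hdk⟩
            · by_cases htb : (t == b) = true
              · rw [if_pos htb] at hj
                have hjn := Option.some.inj hj
                refine Or.inr ⟨0, by omega, by simpa using (beq_iff_eq.mp htb), by push_cast at hd ⊢; omega⟩
              · rw [if_neg htb] at hj
                exact Or.inl ⟨j, hj, by push_cast at hd ⊢; omega⟩
            · exact Or.inr ⟨k' + 1, by omega, by simpa using hka, by omega⟩
        · rintro ⟨m, hm, hcase⟩
          cases m with
          | zero =>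
            exfalso
            rcases hcase with ⟨htb, hbr⟩ | ⟨hta, hbr⟩
            · rcases hbr with ⟨j, hj, hd⟩ | ⟨k, hk, _, _⟩
              · have := h1 (by simpa using htb) j hj
                push_cast at hd; omega
              · omega
            · rcases hbr with ⟨j, hj, hd⟩ | ⟨k, hk, _, _⟩
              · have := h2 (by simpa using hta) j hj
                push_cast at hd; omega
              · omega
          | succ m' =>
            refine ⟨m', by simpa using Nat.lt_of_succ_lt_succ hm, ?_⟩
            rcases hcase with ⟨hb', hbr⟩ | ⟨ha', hbr⟩
            · refine Or.inl ⟨by simpa using hb', ?_⟩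
              rcases hbr with ⟨j, hj, hd⟩ | ⟨k, hk, hka, hdk⟩
              · have hjlt := hla j hj
                by_cases hta : (t == a) = true
                · exact Or.inl ⟨n, by rw [if_pos hta], by push_cast at hd ⊢; omega⟩
                · exact Or.inl ⟨j, by rw [if_neg hta]; exact hj, by push_cast at hd ⊢; omega⟩
              · cases k with
                | zero =>
                  have hta : (t == a) = true := beq_iff_eq.mpr (by simpa using hka)
                  exact Or.inl ⟨n, by rw [if_pos hta], by omega⟩
                | succ k' =>
                  exact Or.inr ⟨k', by omega, by simpa using hka, by omega⟩
            · refine Or.inr ⟨by simpa using ha', ?_⟩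
              rcases hbr with ⟨j, hj, hd⟩ | ⟨k, hk, hka, hdk⟩
              · have hjlt := hlb j hj
                by_cases htb : (t == b) = true
                · exact Or.inl ⟨n, by rw [if_pos htb], by push_cast at hd ⊢; omega⟩
                · exact Or.inl ⟨j, by rw [if_neg htb]; exact hj, by push_cast at hd ⊢; omega⟩
              · cases k with
                | zero =>
                  have htb : (t == b) = true := beq_iff_eq.mpr (by simpa using hka)
                  exact Or.inl ⟨n, by rw [if_pos htb], by omega⟩
                | succ k' =>
                  exact Or.inr ⟨k', by omega, by simpa using hka, by omega⟩


theorem B_iff_near (tokens : List String) (a b : String) :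
    match_multi_alt tokens [a, b] = true ↔ Near tokens a b := by
  have hB : match_multi_alt tokens [a, b] =
      mmLoop a b (PySem.List.enumerate tokens 0) none none := rfl
  rw [hB, mmLoop_iff a b tokens 0 none none (by simp) (by simp)]
  unfold Near
  constructor
  · rintro ⟨m, hm, hcase⟩
    rcases hcase with ⟨hb', hbr⟩ | ⟨ha', hbr⟩
    · rcases hbr with ⟨j, hj, _⟩ | ⟨k, hk, hka, hdk⟩
      · exact absurd hj (by simp)
      · exact ⟨k, m, by omega, hm, hka, hb', by omega⟩
    · rcases hbr with ⟨j, hj, _⟩ | ⟨k, hk, hka, hdk⟩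
      · exact absurd hj (by simp)
      · exact ⟨m, k, hm, by omega, ha', hka, by omega⟩
  · rintro ⟨k, m, hk, hm, ha', hb', hd⟩
    rcases lt_or_gt_of_ne (show k ≠ m by omega) with hlt | hlt
    · exact ⟨m, hm, Or.inl ⟨hb', Or.inr ⟨k, hlt, ha', by omega⟩⟩⟩
    · exact ⟨k, hk, Or.inr ⟨ha', Or.inr ⟨m, hlt, hb', by omega⟩⟩⟩

theorem match_multi_two (tokens : List String) (a b : String) :
    match_multi tokens [a, b] = match_multi_alt tokens [a, b] := by
  rw [Bool.eq_iff_iff, A_iff_near, B_iff_near]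

-- ===== VERDICT (by name: the statement is the Claim_ definition above) =====
theorem match_multi_spec : Claim_equal_match_multi := by
  intro tokens kw_tokens _
  unfold Spec_match_multi
  by_cases h : kw_tokens.length = 2
  · obtain ⟨a, b, rfl⟩ := List.length_eq_two.mp h
    exact match_multi_two tokens a b
  · simp [match_multi, match_multi_alt, h]
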